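-- pv_equiv track=rewrite | github.com/adowsky/kck | lab4/notes_finder.py | _count_staff_height
-- ===== SOURCE A (Python) =====
-- def _count_staff_height(source):
--     top = None
--     max_size = len(source) - 1
--     y = 0
--     while top is None:
--         for x in source[y]:
--             if x > 0:
--                 top = y
--         y += 1
--         if y > max_size:
--             top = -1
--
--     bottom = None
--     y = 0
--     while bottom is None:
--         for x in range(0, len(source[y])):
--             if source[max_size - y][x] > 0:
--                 bottom = max_size - y + 2
--         y += 1
--         if y > max_size:
--             bottom = -1
--     return abs(bottom - top)
-- ===== SOURCE B (Python) =====
-- def _count_staff_height(source):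
--     # Single pass tracking the first and last row indices that contain a positive pixel.
--     first = None
--     last = None
--     for y in range(len(source)):
--         if any(v > 0 for v in source[y]):
--             if first is None:
--                 first = y
--             last = y
--     top = first if first is not None else -1
--     bottom = last + 2 if last is not None else -1
--     return abs(bottom - top)
-- ===== Notes on version B (the rewrite author's own statement) =====
-- stated objective: simpler
-- what changed: Replaces A's two sentinel-driven while-loops (a top-down scan and a separate bottom-up scan that indexes one row with another row's length) by a single forward pass that records the first and last row indices containing a positive pixel.
-- intended difference: When the rows containing positive pixels are exactly row 0 or exactly the last row, A's unconditional end-of-scan 'if y > max_size: top/bottom = -1' overwrites the boundary it just found with -1 (so A returns 0 for [[1]], 1 when only row 0 is lit, n+2 when only the last row is lit), while B returns the intended height 2; the overwrite is an evident off-by-one at the scan boundary, so B's value is the intended one. — e.g. on _count_staff_height([[1]]): A returns 0, B returns 2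
-- outside the precondition, e.g. on _count_staff_height([[1], [1], [0, 1]]): A returns 3, B returns 4
import Mathlib
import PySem

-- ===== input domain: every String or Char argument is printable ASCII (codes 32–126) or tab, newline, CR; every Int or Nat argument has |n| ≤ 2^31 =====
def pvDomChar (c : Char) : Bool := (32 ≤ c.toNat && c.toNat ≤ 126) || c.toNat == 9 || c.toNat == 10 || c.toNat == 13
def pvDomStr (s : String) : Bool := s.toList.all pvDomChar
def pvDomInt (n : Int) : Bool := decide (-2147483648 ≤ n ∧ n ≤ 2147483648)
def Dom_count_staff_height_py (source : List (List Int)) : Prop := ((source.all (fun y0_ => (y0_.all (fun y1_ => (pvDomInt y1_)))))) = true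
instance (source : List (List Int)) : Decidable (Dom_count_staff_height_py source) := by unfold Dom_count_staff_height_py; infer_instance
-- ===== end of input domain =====

-- B replaces A's two sentinel-overwriting scans by one forward pass recording the first and
-- last rows with a positive pixel (simpler); outside D_ (lit rows exactly at one boundary) the
-- values agree on nonempty rectangular images.


-- ===== PORT A =====
-- first while-loop: top-down scan for `top`; fuel = source.length suffices (y > max_size stops it)
def pvATop (source : List (List Int)) (maxSize : Int) : Nat → Int → Int
  | 0, _ => -1   -- unreachable: the loop always stops within source.length iterations
  | fuel+1, y =>
    -- for x in source[y]: if x > 0: top = y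
    let t : Option Int := ((PySem.List.pyGet? source y).getD []).foldl
        (fun t x => if 0 < x then some y else t) none
    let y' := y + 1
    -- if y > max_size: top = -1   (unconditional overwrite, exactly as in A)
    let t := if maxSize < y' then some (-1) else t
    match t with
    | some v => v
    | none => pvATop source maxSize fuel y'

-- second while-loop: bottom-up scan for `bottom`; note it ranges over len(source[y]) while
-- indexing source[max_size - y], exactly as A does (Pre_ makes the two lengths equal)
def pvABot (source : List (List Int)) (maxSize : Int) : Nat → Int → Int
  | 0, _ => -1   -- unreachable
  | fuel+1, y =>
    let rowLen := ((PySem.List.pyGet? source y).getD []).length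
    let b : Option Int := (PySem.List.pyRange 0 (rowLen : Int) 1).foldl
        (fun b x =>
          if 0 < (PySem.List.pyGet? ((PySem.List.pyGet? source (maxSize - y)).getD []) x).getD 0
          then some (maxSize - y + 2) else b) none
    let y' := y + 1
    let b := if maxSize < y' then some (-1) else b
    match b with
    | some v => v
    | none => pvABot source maxSize fuel y'

def count_staff_height_py (source : List (List Int)) : Int :=
  let maxSize : Int := (source.length : Int) - 1
  let top := pvATop source maxSize source.length 0
  let bottom := pvABot source maxSize source.length 0
  |bottom - top|

-- ===== PORT B =====
def count_staff_height_py_alt (source : List (List Int)) : Int :=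
  let p := (List.range source.length).foldl
    (fun (p : Option Int × Option Int) y =>
      if (source.getD y []).any (fun v => decide (0 < v)) then
        ((if p.1 = none then some (y : Int) else p.1), some (y : Int))
      else p) (none, none)
  let top := match p.1 with | some f => f | none => -1
  let bottom := match p.2 with | some l => l + 2 | none => -1
  |bottom - top|

-- ===== PRECONDITION & SPEC =====
-- Pre_ excludes the empty source (A raises IndexError at source[0]) and ragged sources, on which
-- A's bottom-up scan reads row max_size-y using the LENGTH of row y: there A either raises
-- IndexError or silently overlooks pixels — an artefact of the cross-indexing (see cites).
def Pre_count_staff_height_py (source : List (List Int)) : Prop :=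
  source ≠ [] ∧ ∀ row ∈ source, row.length = (source.headD []).length
instance (source : List (List Int)) : Decidable (Pre_count_staff_height_py source) := by
  unfold Pre_count_staff_height_py; infer_instance
def pvWitness_count_staff_height_py : List (List Int) := [[0, 1], [1, 0], [0, 0]]

-- When the rows containing positive pixels are exactly row 0 or exactly the last row, A's
-- unconditional end-of-scan overwrite 'if y > max_size: top/bottom = -1' replaces the boundary it
-- just found by -1 (A returns 0 for [[1]], 1 when only row 0 is lit, n+2 when only the last row
-- is lit) while B returns the intended height 2; the overwrite is an evident off-by-one.
def pvQuiet (row : List Int) : Bool := row.all (fun v => decide (v ≤ 0))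
def D_count_staff_height_py (source : List (List Int)) : Prop :=
  (!source.all pvQuiet && (source.tail.all pvQuiet || source.dropLast.all pvQuiet)) = true
instance (source : List (List Int)) : Decidable (D_count_staff_height_py source) := by
  unfold D_count_staff_height_py; infer_instance

def Spec_count_staff_height_py (source : List (List Int)) (out : Int) : Prop :=
  ¬ D_count_staff_height_py source → out = count_staff_height_py_alt source
instance (source : List (List Int)) (out : Int) : Decidable (Spec_count_staff_height_py source out) := by
  unfold Spec_count_staff_height_py; infer_instance

def pvDiffWitness_count_staff_height_py : List (List Int) := [[1]]
def pvDiffWitnessOut_count_staff_height_py : Int × Int := (0, 2)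

-- ===== CLAIM (what is proved, stated in full; the proofs are below) =====
def Claim_unchanged_count_staff_height_py : Prop := ∀ (source : List (List Int)), Dom_count_staff_height_py source → Pre_count_staff_height_py source → Spec_count_staff_height_py source (count_staff_height_py source)
def Claim_changed_count_staff_height_py : Prop := Dom_count_staff_height_py (pvDiffWitness_count_staff_height_py) ∧ Pre_count_staff_height_py (pvDiffWitness_count_staff_height_py) ∧ D_count_staff_height_py (pvDiffWitness_count_staff_height_py) ∧ count_staff_height_py (pvDiffWitness_count_staff_height_py) = pvDiffWitnessOut_count_staff_height_py.1 ∧ count_staff_height_py_alt (pvDiffWitness_count_staff_height_py) = pvDiffWitnessOut_count_staff_height_py.2 ∧ pvDiffWitnessOut_count_staff_height_py.1 ≠ pvDiffWitnessOut_count_staff_height_py.2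
def Claim_exact_count_staff_height_py : Prop := ∀ (source : List (List Int)), Dom_count_staff_height_py source → Pre_count_staff_height_py source → D_count_staff_height_py source → count_staff_height_py source ≠ count_staff_height_py_alt source

-- ===== LEMMAS AND PROOFS =====

def pvLit (row : List Int) : Bool := row.any (fun v => decide (0 < v))
def pvFst : List (List Int) → Option Nat
  | [] => none
  | r :: rs => if pvLit r then some 0 else (pvFst rs).map (· + 1)
def pvLst : List (List Int) → Option Nat
  | [] => none
  | r :: rs =>
    match pvLst rs with
    | some j => some (j + 1)
    | none => if pvLit r then some 0 else none

theorem pvFst_none_iff (l : List (List Int)) : pvFst l = none ↔ ∀ r ∈ l, pvLit r = false := by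
  induction l with
  | nil => simp [pvFst]
  | cons r rs ih => by_cases h : pvLit r <;> simp [pvFst, h, ih]

theorem pvLst_none_iff (l : List (List Int)) : pvLst l = none ↔ ∀ r ∈ l, pvLit r = false := by
  induction l with
  | nil => simp [pvLst]
  | cons r rs ih =>
    simp only [pvLst]
    cases h : pvLst rs with
    | some j =>
      simp [h] at ih ⊢
      obtain ⟨x, hx, hnz⟩ := ih
      intro _
      exact ⟨x, hx, hnz⟩
    | none =>
      by_cases hr : pvLit r
      · simp [hr]
      · simp [hr]
        exact ih.1 h

theorem pvLst_append_singleton (xs : List (List Int)) (r : List Int) :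
    pvLst (xs ++ [r]) = if pvLit r then some xs.length else pvLst xs := by
  induction xs with
  | nil => by_cases h : pvLit r <;> simp [pvLst, h]
  | cons x xs ih =>
    simp only [List.cons_append, pvLst, ih]
    by_cases h : pvLit r
    · simp [h]
    · simp [h]

theorem pvFst_append_singleton (xs : List (List Int)) (r : List Int) :
    pvFst (xs ++ [r]) = match pvFst xs with
      | some i => some i
      | none => if pvLit r then some xs.length else none := by
  induction xs with
  | nil => by_cases h : pvLit r <;> simp [pvFst, h]
  | cons x xs ih =>
    simp only [List.cons_append, pvFst, ih]
    by_cases h : pvLit x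
    · simp [h]
    · cases hx : pvFst xs <;> by_cases hr : pvLit r <;> simp [h, hr]

theorem pvFst_lt_length (l : List (List Int)) (i : Nat) (h : pvFst l = some i) : i < l.length := by
  induction l generalizing i with
  | nil => simp [pvFst] at h
  | cons r rs ih =>
    simp only [pvFst] at h
    by_cases hr : pvLit r
    · simp [hr] at h; simp [← h]
    · simp [hr] at h
      obtain ⟨j, hj, rfl⟩ := h
      have := ih j hj; simp; omega

theorem pv_foldl_find {α : Type} (p : α → Prop) [DecidablePred p] (c : Int) (l : List α)
    (b : Option Int) :
    l.foldl (fun b x => if p x then some c else b) b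
      = if l.any (fun x => decide (p x)) then some c else b := by
  induction l generalizing b with
  | nil => simp
  | cons x xs ih => by_cases hx : p x <;> simp [hx, ih]

theorem pvATop_char (source : List (List Int)) :
    ∀ (fuel k : Nat), k + fuel = source.length →
    pvATop source ((source.length : Int) - 1) fuel (k : Int) =
      (match pvFst (source.drop k) with
       | some j => if k + j = source.length - 1 then (-1 : Int) else ((k + j : Nat) : Int)
       | none => -1) := by
  intro fuel
  induction fuel with
  | zero =>
    intro k hk
    have h0 : source.drop k = [] := List.drop_eq_nil_of_le (by omega)
    simp [pvATop, h0, pvFst]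
  | succ fuel ih =>
    intro k hk
    have hklt : k < source.length := by omega
    have hdrop : source.drop k = source[k] :: source.drop (k+1) := List.drop_eq_getElem_cons hklt
    have hget : PySem.List.pyGet? source (k : Int) = some source[k] := by
      simp [PySem.List.pyGet?_natCast, List.getElem?_eq_getElem hklt]
    simp only [pvATop, hget, Option.getD_some]
    rw [pv_foldl_find (fun x : Int => 0 < x) (k : Int) source[k] none]
    rw [hdrop]
    by_cases hlast : k + 1 = source.length
    · have hcond : (source.length : Int) - 1 < (k : Int) + 1 := by omega
      rw [if_pos hcond]
      by_cases hnz : pvLit source[k]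
      · simp only [pvFst, pvLit] at hnz ⊢
        simp [hnz]
        omega
      · simp only [pvFst, pvLit] at hnz ⊢
        simp only [Bool.not_eq_true] at hnz
        simp [hnz]
        have h0 : source.drop (k+1) = [] := List.drop_eq_nil_of_le (by omega)
        simp [h0, pvFst]
    · have hcond : ¬ ((source.length : Int) - 1 < (k : Int) + 1) := by omega
      rw [if_neg hcond]
      by_cases hnz : pvLit source[k]
      · simp only [pvLit] at hnz
        simp only [hnz, if_true, pvFst]
        simp [pvLit, hnz]
        omega
      · simp only [pvLit, Bool.not_eq_true] at hnz
        simp only [hnz, Bool.false_eq_true, if_false, pvFst]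
        have : ((k : Int) + 1) = ((k + 1 : Nat) : Int) := by push_cast; ring
        rw [this, ih (k+1) (by omega)]
        simp [pvLit, hnz]
        cases hf : pvFst (source.drop (k+1)) with
        | none => simp
        | some j =>
          simp only [Option.map_some]
          split_ifs <;> push_cast <;> first | omega | ring

theorem pv_scan_eq (row : List Int) :
    ((PySem.List.pyRange 0 (row.length : Int) 1).any
      (fun x => decide (0 < (PySem.List.pyGet? row x).getD 0))) = pvLit row := by
  rw [PySem.List.pyRange_zero_natCast]
  rw [List.any_map]
  rw [Bool.eq_iff_iff]
  simp only [pvLit, List.any_eq_true, List.mem_range, Function.comp_apply,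
    PySem.List.pyGet?_natCast, decide_eq_true_eq]
  constructor
  · rintro ⟨i, hi, hpos⟩
    refine ⟨row[i], List.getElem_mem hi, ?_⟩
    rwa [List.getElem?_eq_getElem hi, Option.getD_some] at hpos
  · rintro ⟨v, hv, hpos⟩
    obtain ⟨i, hi, rfl⟩ := List.mem_iff_getElem.1 hv
    exact ⟨i, hi, by rwa [List.getElem?_eq_getElem hi, Option.getD_some]⟩

theorem pvABot_char (source : List (List Int))
    (hrect : ∀ row ∈ source, row.length = (source.headD []).length) :
    ∀ (fuel k : Nat), k + fuel = source.length →
    pvABot source ((source.length : Int) - 1) fuel (k : Int) =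
      (match pvLst (source.take (source.length - k)) with
       | some j => if j = 0 then (-1 : Int) else (j : Int) + 2
       | none => -1) := by
  intro fuel
  induction fuel with
  | zero =>
    intro k hk
    have h0 : source.length - k = 0 := by omega
    simp [pvABot, h0, pvLst]
  | succ fuel ih =>
    intro k hk
    have hklt : k < source.length := by omega
    set n := source.length with hn
    set m := n - 1 - k with hm
    have hmlt : m < source.length := by omega
    have hget : PySem.List.pyGet? source (k : Int) = some source[k] := by
      simp [PySem.List.pyGet?_natCast, List.getElem?_eq_getElem hklt]
    have hcast : (n : Int) - 1 - (k : Int) = ((m : Nat) : Int) := by omega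
    have hgetm : PySem.List.pyGet? source ((n : Int) - 1 - (k : Int)) = some source[m] := by
      rw [hcast]
      simp [PySem.List.pyGet?_natCast, List.getElem?_eq_getElem hmlt]
    have hlen : source[k].length = source[m].length := by
      rw [hrect source[k] (List.getElem_mem hklt), hrect source[m] (List.getElem_mem hmlt)]
    have htake : source.take (n - k) = source.take m ++ [source[m]] := by
      have h1 : n - k = m + 1 := by omega
      rw [h1, List.take_add_one, List.getElem?_eq_getElem hmlt]
      rfl
    have hlentake : (source.take m).length = m := by
      simp [List.length_take]; omega
    simp only [pvABot, hget, Option.getD_some, hgetm]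
    rw [hlen, pv_foldl_find (fun x : Int => 0 < (PySem.List.pyGet? source[m] x).getD 0)]
    rw [pv_scan_eq source[m]]
    rw [htake, pvLst_append_singleton, hlentake]
    by_cases hlast : k + 1 = n
    · have hcond : (n : Int) - 1 < (k : Int) + 1 := by omega
      rw [if_pos hcond]
      by_cases hnz : pvLit source[m]
      · have hm0 : m = 0 := by omega
        simp only [hm0] at hnz ⊢
        simp [hnz]
      · simp only [hnz, Bool.false_eq_true, if_false]
        have h0 : source.take m = [] := by
          have : m = 0 := by omega
          simp [this]
        simp [h0, pvLst]
    · have hcond : ¬ ((n : Int) - 1 < (k : Int) + 1) := by omega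
      rw [if_neg hcond]
      by_cases hnz : pvLit source[m]
      · have hm0 : ¬ (m = 0) := by omega
        simp [hnz, hm0, hcast]
      · simp only [hnz, Bool.false_eq_true, if_false]
        have hcast2 : ((k : Int) + 1) = ((k + 1 : Nat) : Int) := by push_cast; ring
        rw [hcast2, ih (k+1) (by omega)]
        have : source.take (n - (k+1)) = source.take m := by
          have : n - (k+1) = m := by omega
          rw [this]
        rw [this]

theorem pvBfold_char (source : List (List Int)) :
    ∀ k, k ≤ source.length →
    (List.range k).foldl
      (fun (p : Option Int × Option Int) y =>
        if (source.getD y []).any (fun v => decide (0 < v)) then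
          ((if p.1 = none then some (y : Int) else p.1), some (y : Int))
        else p) (none, none)
    = ((pvFst (source.take k)).map (fun i => (i : Int)),
       (pvLst (source.take k)).map (fun j => (j : Int))) := by
  intro k
  induction k with
  | zero => intro _; simp [pvFst, pvLst]
  | succ k ih =>
    intro hk
    have hklt : k < source.length := by omega
    rw [List.range_succ, List.foldl_append, ih (by omega)]
    have hgd : source.getD k [] = source[k] := List.getD_eq_getElem source [] hklt
    have htake : source.take (k+1) = source.take k ++ [source[k]] := by
      rw [List.take_add_one, List.getElem?_eq_getElem hklt]; rfl
    have hlentake : (source.take k).length = k := by simp [List.length_take]; omega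
    simp only [List.foldl_cons, List.foldl_nil, hgd, htake,
      pvFst_append_singleton, pvLst_append_singleton, hlentake]
    by_cases hnz : pvLit source[k]
    · simp only [pvLit] at hnz
      cases hf : pvFst (source.take k) <;> simp [pvLit, hnz]
    · simp only [pvLit] at hnz
      cases hf : pvFst (source.take k) <;> simp [pvLit, hnz]

theorem pvFst_none_iff_pvLst_none (l : List (List Int)) : pvFst l = none ↔ pvLst l = none := by
  rw [pvFst_none_iff, pvLst_none_iff]

theorem pvLst_cons_zero (r : List Int) (rs : List (List Int))
    (h : pvLst (r :: rs) = some 0) : ∀ row ∈ rs, pvLit row = false := by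
  rw [← pvLst_none_iff]
  simp only [pvLst] at h
  cases hx : pvLst rs with
  | none => rfl
  | some j => rw [hx] at h; simp at h

theorem pvFst_last (l : List (List Int)) (h : pvFst l = some (l.length - 1)) :
    ∀ row ∈ l.dropLast, pvLit row = false := by
  induction l with
  | nil => simp
  | cons r rs ih =>
    simp only [pvFst] at h
    by_cases hr : pvLit r
    · simp [hr] at h
      have : rs = [] := by
        cases rs with
        | nil => rfl
        | cons a as => simp at h
      subst this
      simp
    · simp [hr] at h
      obtain ⟨j, hj, hj1⟩ := h
      have hrsne : rs ≠ [] := by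
        intro he; subst he; simp [pvFst] at hj
      have hjlen : j = rs.length - 1 := by
        have := pvFst_lt_length rs j hj
        omega
      rw [List.dropLast_cons_of_ne_nil hrsne]
      intro row hrow
      rcases List.mem_cons.1 hrow with rfl | hrow
      · simpa using hr
      · exact ih (hjlen ▸ hj) row hrow

theorem pvLit_false_iff (row : List Int) : pvLit row = false ↔ ∀ v ∈ row, v ≤ 0 := by
  simp [pvLit, not_lt]

theorem pvA_val (source : List (List Int))
    (hrect : ∀ row ∈ source, row.length = (source.headD []).length) :
    count_staff_height_py source =
      |(match pvLst source with
        | some j => if j = 0 then (-1 : Int) else (j : Int) + 2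
        | none => -1) -
       (match pvFst source with
        | some i => if i = source.length - 1 then (-1 : Int) else (i : Int)
        | none => -1)| := by
  have htop := pvATop_char source source.length 0 (by omega)
  have hbot := pvABot_char source hrect source.length 0 (by omega)
  simp only [Nat.cast_zero, List.drop_zero, Nat.sub_zero, List.take_length, Nat.zero_add] at htop hbot
  simp only [count_staff_height_py, htop, hbot]

theorem pvB_val (source : List (List Int)) :
    count_staff_height_py_alt source =
      |(match pvLst source with
        | some j => (j : Int) + 2
        | none => -1) -
       (match pvFst source with
        | some i => (i : Int)
        | none => -1)| := by
  have h := pvBfold_char source source.length (le_refl _)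
  simp only [List.take_length] at h
  simp only [count_staff_height_py_alt, h]
  cases pvFst source <;> cases pvLst source <;> simp

theorem pvD_iff (source : List (List Int)) :
    D_count_staff_height_py source ↔
      ((∃ row ∈ source, ∃ v ∈ row, 0 < v) ∧
       ((∀ row ∈ source.tail, ∀ v ∈ row, v ≤ 0) ∨ (∀ row ∈ source.dropLast, ∀ v ∈ row, v ≤ 0))) := by
  unfold D_count_staff_height_py pvQuiet
  simp [List.all_eq_true, not_le, not_forall]

theorem pv_ex_pos (l : List (List Int)) (i : Nat) (h : pvFst l = some i) :
    ∃ row ∈ l, ∃ v ∈ row, 0 < v := by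
  by_contra hc
  have hall : ∀ r ∈ l, pvLit r = false := by
    intro r hr
    rw [pvLit_false_iff]
    intro v hv
    by_contra hvpos
    exact hc ⟨r, hr, v, hv, by omega⟩
  simp [(pvFst_none_iff l).2 hall] at h

theorem pv_unchanged (source : List (List Int))
    (hne : source ≠ [])
    (hrect : ∀ row ∈ source, row.length = (source.headD []).length)
    (hnD : ¬ D_count_staff_height_py source) :
    count_staff_height_py source = count_staff_height_py_alt source := by
  rw [pvD_iff] at hnD
  rw [pvA_val source hrect, pvB_val source]
  cases hf : pvFst source with
  | none =>
    have hl : pvLst source = none := (pvFst_none_iff_pvLst_none source).1 hf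
    simp [hl]
  | some i =>
    cases hl : pvLst source with
    | none =>
      exact absurd ((pvFst_none_iff_pvLst_none source).2 hl) (by simp [hf])
    | some j =>
      have hex : ∃ row ∈ source, ∃ v ∈ row, 0 < v := pv_ex_pos source i hf
      have hj0 : j ≠ 0 := by
        intro h0
        subst h0
        apply hnD
        refine ⟨hex, Or.inl ?_⟩
        cases source with
        | nil => simp at hne
        | cons r rs =>
          intro row hrow
          exact (pvLit_false_iff row).1 (pvLst_cons_zero r rs hl row hrow)
      have hi : i ≠ source.length - 1 := by
        intro h0
        subst h0
        apply hnD
        exact ⟨hex, Or.inr (fun row hrow => (pvLit_false_iff row).1 (pvFst_last source hf row hrow))⟩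
      simp [hj0, hi]

theorem pv_tight (source : List (List Int))
    (hne : source ≠ [])
    (hrect : ∀ row ∈ source, row.length = (source.headD []).length)
    (hD : D_count_staff_height_py source) :
    count_staff_height_py source ≠ count_staff_height_py_alt source := by
  rw [pvD_iff] at hD
  obtain ⟨⟨row, hrow, v, hv, hpos⟩, hcase⟩ := hD
  rw [pvA_val source hrect, pvB_val source]
  rcases hcase with htail | hlastc
  · -- all positive pixels in row 0
    cases source with
    | nil => simp at hne
    | cons r rs =>
      have hnzr : pvLit r = true := by
        rcases List.mem_cons.1 hrow with rfl | hrow'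
        · simp only [pvLit, List.any_eq_true]
          exact ⟨v, hv, by simpa using hpos⟩
        · exact absurd hpos (by simpa using htail row hrow' v hv)
      have hlrs : pvLst rs = none :=
        (pvLst_none_iff rs).2 (fun r' hr' => (pvLit_false_iff r').2 (htail r' hr'))
      have hl : pvLst (r :: rs) = some 0 := by simp [pvLst, hlrs, hnzr]
      have hfnone : pvFst (r :: rs) = some 0 := by simp [pvFst, hnzr]
      rw [hl, hfnone]
      by_cases hn1 : rs = []
      · subst hn1; simp
      · have hcond : ¬ ((0 : Nat) = (r :: rs).length - 1) := by
          cases rs with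
          | nil => simp at hn1
          | cons a as => simp
        simp only [hcond, if_false]
        norm_num
  · -- all positive pixels in the last row
    have hsplit : source.dropLast ++ [source.getLast hne] = source := List.dropLast_append_getLast hne
    have hnzlast : pvLit (source.getLast hne) = true := by
      rcases (by rw [hsplit]; exact hrow : row ∈ source.dropLast ++ [source.getLast hne]) |> List.mem_append.1 with hrl | hrl
      · exact absurd hpos (by simpa using hlastc row hrl v hv)
      · simp only [List.mem_singleton] at hrl
        subst hrl
        simp only [pvLit, List.any_eq_true]
        exact ⟨v, hv, by simpa using hpos⟩
    have hfdrop : pvFst source.dropLast = none :=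
      (pvFst_none_iff _).2 (fun r' hr' => (pvLit_false_iff r').2 (hlastc r' hr'))
    have hldrop : pvLst source.dropLast = none := (pvFst_none_iff_pvLst_none _).1 hfdrop
    have hlen : source.dropLast.length = source.length - 1 := by simp
    have hf : pvFst source = some (source.length - 1) := by
      rw [← hsplit, pvFst_append_singleton, hfdrop, hnzlast]
      simp [hlen]
    have hl : pvLst source = some (source.length - 1) := by
      rw [← hsplit, pvLst_append_singleton, hnzlast]
      simp [hlen]
    rw [hf, hl]
    have hlen1 : 1 ≤ source.length := List.length_pos_of_ne_nil hne
    by_cases hn1 : source.length = 1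
    · simp [hn1]
    · have h1 : source.length - 1 ≠ 0 := by omega
      simp [h1]
      have hcst : ((source.length - 1 : Nat) : Int) = (source.length : Int) - 1 := by
        push_cast [hlen1]; ring
      rw [hcst]
      intro h
      rw [abs_of_nonneg (by omega : (0:Int) ≤ (source.length : Int) - 1 + 2 + 1)] at h
      omega

-- ===== VERDICT (by name: the statement is the Claim_ definition above) =====
theorem count_staff_height_py_spec : Claim_unchanged_count_staff_height_py := by
  intro source _ hpre hnD
  exact pv_unchanged source hpre.1 hpre.2 hnD

theorem count_staff_height_py_changed : Claim_changed_count_staff_height_py := by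
  unfold Claim_changed_count_staff_height_py; decide

theorem count_staff_height_py_tight : Claim_exact_count_staff_height_py := by
  intro source _ hpre hD
  exact pv_tight source hpre.1 hpre.2 hD
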